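-- pv_equiv track=rewrite | github.com/Linths/prime-factors | data/Generate_data.py | find_firsts
-- ===== SOURCE A (Python) =====
-- import math
--
-- def isPrime(n):
--     if (n<=1): return False
--     if (n<=3): return True
--     if (n%2==0 or n%3==0):
--         return False
--     for i in range(5,int(math.sqrt(n)+1),6):
--         if (n%i ==0 or n%(i+2)==0):
--             return False
--     return True
--
-- def nextPrime(N):
--     if (N<=1): return 2
--     prime = N
--     found = False
--     while (not found):
--         prime = prime + 2
--         if (isPrime(prime) == True):
--             found = True
--     return prime
--
-- def find_firsts(n=256):
--     first_primes = [2,3]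
--     prod = 2*3
--     while (prod <= 2**n):
--         next_prime = nextPrime(first_primes[-1])
--         first_primes.append(next_prime)
--         prod = prod*next_prime
--     return first_primes
-- ===== SOURCE B (Python) =====
-- def _is_prime_by(primes, c):
--     # trial division by the already-found primes, stopping at sqrt(c)
--     for p in primes:
--         if c < p * p:
--             return True
--         if c % p == 0:
--             return False
--     return True
--
-- def find_firsts(n=256):
--     primes = [2, 3]
--     if n < 3:
--         return primes          # product 6 already exceeds 2**n
--     target = 1 << n
--     prod = 6
--     while prod <= target:
--         c = primes[-1] + 2
--         while not _is_prime_by(primes, c):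
--             c += 2
--         primes.append(c)
--         prod *= c
--     return primes
-- ===== Notes on version B (the rewrite author's own statement) =====
-- stated objective: faster
-- what changed: Instead of testing each candidate with a fresh 6k±1 trial-division sweep up to sqrt (recomputing math.sqrt and scanning all wheel numbers), B tests candidates by dividing only by the primes already collected in the result list (stopping once p*p > c), so the prime list itself becomes the divisor table.
import Mathlib
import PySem

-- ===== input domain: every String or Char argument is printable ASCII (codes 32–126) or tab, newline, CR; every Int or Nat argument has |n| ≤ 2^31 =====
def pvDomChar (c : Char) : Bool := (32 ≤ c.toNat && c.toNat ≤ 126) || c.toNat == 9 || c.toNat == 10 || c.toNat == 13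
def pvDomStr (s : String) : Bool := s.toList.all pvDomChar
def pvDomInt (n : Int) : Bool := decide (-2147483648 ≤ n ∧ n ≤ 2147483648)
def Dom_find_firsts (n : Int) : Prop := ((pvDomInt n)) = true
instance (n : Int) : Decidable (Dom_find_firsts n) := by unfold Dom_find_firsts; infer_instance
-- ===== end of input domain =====

-- B replaces A's per-candidate 6k±1 trial-division sweep up to sqrt by trial division using
-- only the primes already collected in the result list (stopping once p*p > c).

-- ===== PORT A =====

-- isPrime(n): `int(math.sqrt(n)+1)` is ported as `Nat.sqrt n.toNat + 1`, exact for the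
-- 4 ≤ n ≤ 2^32 reached here (doubles hold these integers exactly, math.sqrt is correctly
-- rounded, and the +1 is an exact float addition).  The early-return-False loop over the
-- range is the List.all of the negated test.
def isPrime (n : Int) : Bool :=
  if n ≤ 1 then false
  else if n ≤ 3 then true
  else if PySem.Int.mod n 2 == 0 || PySem.Int.mod n 3 == 0 then false
  else (PySem.List.pyRange 5 ((Nat.sqrt n.toNat : Int) + 1) 6).all
         (fun i => !(PySem.Int.mod n i == 0 || PySem.Int.mod n (i + 2) == 0))

-- nextPrime's `while not found: prime += 2; if isPrime(prime): found = True` as a candidate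
-- loop: c is the candidate prime+2 about to be tested.  The fuel N+4 is a totality guard that
-- provably never runs out on the odd N ≥ 3 this is called with (Bertrand: next prime ≤ 2N).
def nextPrimeLoop (c : Int) (fuel : Nat) : Int :=
  match fuel with
  | 0 => c
  | f + 1 => if isPrime c then c else nextPrimeLoop (c + 2) f

def nextPrime (N : Int) : Int :=
  if N ≤ 1 then 2 else nextPrimeLoop (N + 2) (N.toNat + 4)

-- `prod <= 2**n`: for n < 0 Python compares the int prod with the positive float 2.0**n < 1,
-- which is false at every state reached (prod ≥ 6); for n ≥ 0 it is the exact int comparison.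
def pow2cond (prod n : Int) : Bool :=
  if 0 ≤ n then decide (prod ≤ 2 ^ n.toNat) else false

-- the `while prod <= 2**n` loop; each iteration appends one prime ≥ 5, so prod ≥ 6·5^k after
-- k appends and the fuel n+1 (a totality guard) provably never runs out.
def findLoopA (n : Int) (primes : List Int) (prod : Int) (fuel : Nat) : List Int :=
  match fuel with
  | 0 => primes
  | f + 1 =>
    if pow2cond prod n then
      let np := nextPrime (PySem.List.pyGetD primes (-1) 0)
      findLoopA n (primes ++ [np]) (prod * np) f
    else primes

def find_firsts (n : Int) : List Int :=
  findLoopA n [2, 3] 6 (n.toNat + 1)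

-- ===== PORT B =====

-- _is_prime_by(primes, c): trial division by the stored primes, early exit once p*p > c
def isPrimeBy (primes : List Int) (c : Int) : Bool :=
  match primes with
  | [] => true
  | p :: rest =>
    if c < p * p then true
    else if PySem.Int.mod c p == 0 then false
    else isPrimeBy rest c

-- `while not _is_prime_by(primes, c): c += 2`; same kind of fuel guard as A's search loop
-- (provably never exhausted on the states reached, by Bertrand)
def searchLoop (primes : List Int) (c : Int) (fuel : Nat) : Int :=
  match fuel with
  | 0 => c
  | f + 1 => if isPrimeBy primes c then c else searchLoop primes (c + 2) f

def findLoopB (target : Int) (primes : List Int) (prod : Int) (fuel : Nat) : List Int :=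
  match fuel with
  | 0 => primes
  | f + 1 =>
    if prod ≤ target then
      let q := PySem.List.pyGetD primes (-1) 0
      let c := searchLoop primes (q + 2) (q.toNat + 4)
      findLoopB target (primes ++ [c]) (prod * c) f
    else primes

def find_firsts_alt (n : Int) : List Int :=
  if n < 3 then [2, 3]
  else findLoopB (2 ^ n.toNat) [2, 3] 6 (n.toNat + 1)

-- ===== PRECONDITION & SPEC =====
def Spec_find_firsts (n : Int) (out : List Int) : Prop := out = find_firsts_alt n
instance (n : Int) (out : List Int) : Decidable (Spec_find_firsts n out) := by unfold Spec_find_firsts; infer_instance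

-- ===== CLAIM (what is proved, stated in full; the proofs are below) =====
def Claim_equal_find_firsts : Prop := ∀ (n : Int), Dom_find_firsts n → Spec_find_firsts n (find_firsts n)

-- ===== LEMMAS AND PROOFS =====

-- the primes below m, in increasing order, as the Int list both programs accumulate
def primesBelow (m : Nat) : List Int :=
  List.map (fun (k : Nat) => (k : Int)) (List.filter (fun k => decide (Nat.Prime k)) (List.range m))

theorem mem_primesBelow {m : Nat} {p : Int} :
    p ∈ primesBelow m ↔ ∃ k, k < m ∧ Nat.Prime k ∧ p = (k : Int) := by
  rw [primesBelow]
  constructor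
  · intro h
    obtain ⟨k, hk, rfl⟩ := List.mem_map.mp h
    obtain ⟨hk1, hk2⟩ := List.mem_filter.mp hk
    exact ⟨k, List.mem_range.mp hk1, of_decide_eq_true hk2, rfl⟩
  · rintro ⟨k, hk, hkp, rfl⟩
    exact List.mem_map.mpr ⟨k, List.mem_filter.mpr ⟨List.mem_range.mpr hk, decide_eq_true hkp⟩, rfl⟩

theorem pairwise_primesBelow (m : Nat) : (primesBelow m).Pairwise (· ≤ ·) := by
  have h1 : ((List.range m).filter (fun k => decide (Nat.Prime k))).Pairwise (· < ·) :=
    (List.pairwise_lt_range).filter _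
  rw [primesBelow]
  refine List.Pairwise.map (R := fun (a b : Nat) => a < b) (fun (k : Nat) => (k : Int))
    (fun a b hab => ?_) h1
  show ((a : Int)) ≤ ((b : Int))
  exact_mod_cast Nat.le_of_lt hab

theorem primesBelow_succ_not {m : Nat} (h : ¬ Nat.Prime m) :
    primesBelow (m + 1) = primesBelow m := by
  simp [primesBelow, List.range_succ, List.filter_append, h]

theorem primesBelow_succ_prime {m : Nat} (h : Nat.Prime m) :
    primesBelow (m + 1) = primesBelow m ++ [(m : Int)] := by
  simp [primesBelow, List.range_succ, List.filter_append, h]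

theorem primesBelow_stable {a b : Nat} (hab : a ≤ b)
    (h : ∀ k, a ≤ k → k < b → ¬ Nat.Prime k) : primesBelow b = primesBelow a := by
  induction b, hab using Nat.le_induction with
  | base => rfl
  | succ b hab ih =>
    rw [primesBelow_succ_not (h b hab (Nat.lt_succ_self b))]
    exact ih (fun k hk1 hk2 => h k hk1 (Nat.lt_succ_of_lt hk2))

theorem not_prime_even_succ {m : Nat} (h5 : 5 ≤ m) (hodd : m % 2 = 1) :
    ¬ Nat.Prime (m + 1) := by
  intro hp
  rcases hp.eq_one_or_self_of_dvd 2 (Nat.dvd_of_mod_eq_zero (by omega)) with h | h <;> omega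

-- ---- correctness of A's wheel primality test ----

theorem isPrime_eq (m : Nat) : isPrime (m : Int) = decide (Nat.Prime m) := by
  by_cases hm4 : m ≤ 4
  · interval_cases m <;> decide
  · push_neg at hm4
    have h1 : ¬ ((m : Int) ≤ 1) := by exact_mod_cast (by omega : ¬ (m ≤ 1))
    have h3 : ¬ ((m : Int) ≤ 3) := by exact_mod_cast (by omega : ¬ (m ≤ 3))
    rw [isPrime, if_neg h1, if_neg h3]
    by_cases h23 : m % 2 = 0 ∨ m % 3 = 0
    · have hcond : (PySem.Int.mod (m : Int) 2 == 0 || PySem.Int.mod (m : Int) 3 == 0) = true := by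
        have h2' : PySem.Int.mod (m : Int) 2 = ((m % 2 : Nat) : Int) := by
          exact_mod_cast PySem.Int.mod_natCast m 2
        have h3' : PySem.Int.mod (m : Int) 3 = ((m % 3 : Nat) : Int) := by
          exact_mod_cast PySem.Int.mod_natCast m 3
        rcases h23 with h | h
        · simp only [h2', h3', h]; simp; all_goals omega
        · simp only [h2', h3', h]; simp; all_goals omega
      rw [if_pos hcond]
      have hnp : ¬ Nat.Prime m := by
        intro hp
        rcases h23 with h | h
        · rcases hp.eq_one_or_self_of_dvd 2 (Nat.dvd_of_mod_eq_zero h) with h' | h' <;> omega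
        · rcases hp.eq_one_or_self_of_dvd 3 (Nat.dvd_of_mod_eq_zero h) with h' | h' <;> omega
      simp [hnp]
    · push_neg at h23
      obtain ⟨hm2, hm3⟩ := h23
      have hcond : ¬ ((PySem.Int.mod (m : Int) 2 == 0 || PySem.Int.mod (m : Int) 3 == 0) = true) := by
        simp only [Bool.or_eq_true, beq_iff_eq, not_or, PySem.Int.mod_eq_zero_iff_dvd]
        refine ⟨fun hdvd => ?_, fun hdvd => ?_⟩
        · have : (2:Nat) ∣ m := by exact_mod_cast hdvd
          omega
        · have : (3:Nat) ∣ m := by exact_mod_cast hdvd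
          omega
      rw [if_neg hcond, Int.toNat_natCast, Bool.eq_iff_iff, List.all_eq_true, decide_eq_true_eq]
      have hmem : ∀ i : Int, i ∈ PySem.List.pyRange 5 ((Nat.sqrt m : Int) + 1) 6 ↔
          5 ≤ i ∧ i < (Nat.sqrt m : Int) + 1 ∧ (6 : Int) ∣ i - 5 :=
        PySem.List.mem_pyRange_iff_of_pos (by norm_num)
      have helt : ∀ i : Int, ((!(PySem.Int.mod (m:Int) i == 0 || PySem.Int.mod (m:Int) (i + 2) == 0)) = true)
          ↔ (¬ i ∣ (m:Int) ∧ ¬ (i + 2) ∣ (m:Int)) := by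
        intro i
        simp [PySem.Int.mod_eq_zero_iff_dvd]
      constructor
      · intro hall
        by_contra hnp
        have hm1 : m ≠ 1 := by omega
        set d := m.minFac with hd
        have hdp : Nat.Prime d := Nat.minFac_prime hm1
        have hdvd : d ∣ m := Nat.minFac_dvd m
        have hsq : d * d ≤ m := by
          have h := Nat.minFac_sq_le_self (by omega : 0 < m) hnp
          rwa [pow_two] at h
        have hd2 : d ≠ 2 := by intro h; rw [h] at hdvd; omega
        have hd3 : d ≠ 3 := by intro h; rw [h] at hdvd; omega
        have hd4 : d ≠ 4 := by rintro h; rw [h] at hdp; exact absurd hdp (by decide)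
        have hdge : 5 ≤ d := by have := hdp.two_le; omega
        have hdmod2 : d % 2 = 1 := by
          rcases Nat.mod_two_eq_zero_or_one d with h | h
          · exfalso
            have : (2:Nat) ∣ m := dvd_trans (Nat.dvd_of_mod_eq_zero h) hdvd
            omega
          · exact h
        have hdmod3 : d % 3 ≠ 0 := by
          intro h
          have : (3:Nat) ∣ m := dvd_trans (Nat.dvd_of_mod_eq_zero h) hdvd
          omega
        have hdsqrt : d ≤ Nat.sqrt m := Nat.le_sqrt.mpr hsq
        have hd6 : d % 6 = 1 ∨ d % 6 = 5 := by omega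
        rcases hd6 with h6 | h6
        · -- witness i = d - 2; i + 2 = d divides m
          have hmem' : ((d : Int) - 2) ∈ PySem.List.pyRange 5 ((Nat.sqrt m : Int) + 1) 6 := by
            rw [hmem]
            refine ⟨by exact_mod_cast (by omega : (5:Int) ≤ (d:Int) - 2), ?_, ?_⟩
            · have : (d : Int) ≤ (Nat.sqrt m : Int) := by exact_mod_cast hdsqrt
              omega
            · omega
          have := (helt _).mp (hall _ hmem')
          exact this.2 (by
            have : (d : Int) ∣ (m : Int) := by exact_mod_cast hdvd
            simpa using this)
        · -- witness i = d itself
          have hmem' : ((d : Int)) ∈ PySem.List.pyRange 5 ((Nat.sqrt m : Int) + 1) 6 := by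
            rw [hmem]
            refine ⟨by exact_mod_cast hdge, ?_, ?_⟩
            · have : (d : Int) ≤ (Nat.sqrt m : Int) := by exact_mod_cast hdsqrt
              omega
            · omega
          have := (helt _).mp (hall _ hmem')
          exact this.1 (by exact_mod_cast hdvd)
      · intro hp i hi
        rw [hmem] at hi
        obtain ⟨hi5, hiub, _⟩ := hi
        have hs5 : 5 ≤ Nat.sqrt m := by
          have : (5:Int) ≤ (Nat.sqrt m : Int) := by omega
          exact_mod_cast this
        have hssq : Nat.sqrt m * Nat.sqrt m ≤ m := Nat.sqrt_le m
        have h5s : 5 * Nat.sqrt m ≤ Nat.sqrt m * Nat.sqrt m := Nat.mul_le_mul_right _ hs5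
        have hsm : Nat.sqrt m + 2 < m := by omega
        rw [helt]
        constructor
        · intro hdvd
          have h0i : 0 ≤ i := by omega
          have hdvdn : i.toNat ∣ m := by
            have : ((i.toNat : Int)) ∣ (m : Int) := by rwa [Int.toNat_of_nonneg h0i]
            exact_mod_cast this
          rcases hp.eq_one_or_self_of_dvd _ hdvdn with h | h <;>
            (have h1 : (i.toNat : Int) = i := Int.toNat_of_nonneg h0i
             have h2 : (i : Int) ≤ (Nat.sqrt m : Int) := by omega
             have h3 : i.toNat ≤ Nat.sqrt m := by exact_mod_cast (h1 ▸ h2)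
             omega)
        · intro hdvd
          have h0i : (0:Int) ≤ i + 2 := by omega
          have hdvdn : (i + 2).toNat ∣ m := by
            have : (((i+2).toNat : Int)) ∣ (m : Int) := by rwa [Int.toNat_of_nonneg h0i]
            exact_mod_cast this
          rcases hp.eq_one_or_self_of_dvd _ hdvdn with h | h <;>
            (have h1 : ((i+2).toNat : Int) = i + 2 := Int.toNat_of_nonneg h0i
             have h2 : (i : Int) + 2 ≤ (Nat.sqrt m : Int) + 2 := by omega
             have h3 : (i+2).toNat ≤ Nat.sqrt m + 2 := by exact_mod_cast (h1 ▸ h2)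
             omega)

-- ---- correctness of B's trial division by the stored primes ----

theorem isPrimeBy_aux (c : Int) : ∀ (L : List Int), (∀ p ∈ L, 0 < p) → L.Pairwise (· ≤ ·) →
    (isPrimeBy L c = true ↔ ∀ p ∈ L, p * p ≤ c → ¬ (p ∣ c)) := by
  intro L
  induction L with
  | nil => simp [isPrimeBy]
  | cons p rest ih =>
    intro hpos hsort
    rcases List.pairwise_cons.mp hsort with ⟨hle, hsort'⟩
    rw [isPrimeBy]
    split_ifs with h1 h2
    · simp only [true_iff]
      intro q hq hqq
      rcases List.mem_cons.mp hq with rfl | hq'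
      · omega
      · have hpq : p ≤ q := hle q hq'
        have hp0 : 0 < p := hpos p (List.mem_cons_self)
        nlinarith
    · simp only [false_iff]
      push_neg
      refine ⟨p, List.mem_cons_self, by omega, ?_⟩
      rw [← PySem.Int.mod_eq_zero_iff_dvd]
      exact beq_iff_eq.mp h2
    · rw [ih (fun q hq => hpos q (List.mem_cons_of_mem p hq)) hsort']
      constructor
      · intro h q hq hqq
        rcases List.mem_cons.mp hq with rfl | hq'
        · rw [← PySem.Int.mod_eq_zero_iff_dvd]
          intro hmod
          exact h2 (beq_iff_eq.mpr hmod)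
        · exact h q hq' hqq
      · intro h q hq hqq
        exact h q (List.mem_cons_of_mem p hq) hqq

theorem isPrimeBy_eq (m : Nat) (h2 : 2 ≤ m) :
    isPrimeBy (primesBelow m) (m : Int) = decide (Nat.Prime m) := by
  have hpos : ∀ p ∈ primesBelow m, 0 < p := by
    intro p hp
    obtain ⟨k, _, hkp, rfl⟩ := mem_primesBelow.mp hp
    exact_mod_cast hkp.pos
  rw [Bool.eq_iff_iff, decide_eq_true_eq, isPrimeBy_aux _ _ hpos (pairwise_primesBelow m)]
  constructor
  · intro h
    by_contra hnp
    set d := m.minFac with hd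
    have hdp : Nat.Prime d := Nat.minFac_prime (by omega)
    have hdvd : d ∣ m := Nat.minFac_dvd m
    have hsq : d * d ≤ m := by
      have h := Nat.minFac_sq_le_self (by omega : 0 < m) hnp
      rwa [pow_two] at h
    have hdlt : d < m := by
      have h2d := hdp.two_le
      have hmul : 2 * d ≤ d * d := Nat.mul_le_mul_right d h2d
      omega
    exact h (d : Int) (mem_primesBelow.mpr ⟨d, hdlt, hdp, rfl⟩)
      (by exact_mod_cast hsq) (by exact_mod_cast hdvd)
  · intro hp q hq hqq hdvd
    obtain ⟨k, hk, hkp, rfl⟩ := mem_primesBelow.mp hq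
    have : k ∣ m := by exact_mod_cast hdvd
    rcases hp.eq_one_or_self_of_dvd _ this with h | h
    · exact absurd h (by have := hkp.two_le; omega)
    · omega

-- ---- the two next-prime searches agree and both find the next prime ----

theorem search_eq (p : Nat) (hp : Nat.Prime p) (hpodd : p % 2 = 1) :
    ∀ (f : Nat) (m : Nat) (L : List Int), 5 ≤ m → m % 2 = 1 → m ≤ p →
    (∀ k, m ≤ k → k < p → ¬ Nat.Prime k) → p < m + 2 * f → L = primesBelow m →
    nextPrimeLoop (m : Int) f = (p : Int) ∧ searchLoop L (m : Int) f = (p : Int) := by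
  intro f
  induction f with
  | zero => intro m L _ _ hmp _ hfuel _; omega
  | succ f ih =>
    intro m L h5 hodd hmp hnone hfuel hL
    by_cases hmeq : m = p
    · subst hmeq
      have hiP : isPrime (m : Int) = true := by rw [isPrime_eq]; simpa using hp
      have hiB : isPrimeBy L (m : Int) = true := by
        rw [hL, isPrimeBy_eq m (by omega)]; simpa using hp
      exact ⟨by rw [nextPrimeLoop, if_pos hiP], by rw [searchLoop, if_pos hiB]⟩
    · have hmlt : m < p := by omega
      have hnpm : ¬ Nat.Prime m := hnone m le_rfl hmlt
      have hiP : isPrime (m : Int) = false := by rw [isPrime_eq]; simpa using hnpm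
      have hiB : isPrimeBy L (m : Int) = false := by
        rw [hL, isPrimeBy_eq m (by omega)]; simpa using hnpm
      have hL' : L = primesBelow (m + 2) := by
        rw [show m + 2 = (m + 1) + 1 from rfl,
          primesBelow_succ_not (not_prime_even_succ h5 hodd),
          primesBelow_succ_not hnpm, hL]
      have hstep := ih (m + 2) L (by omega) (by omega) (by omega)
        (fun k hk1 hk2 => hnone k (by omega) hk2) (by omega) hL'
      have hcast : ((m : Int) + 2) = ((m + 2 : Nat) : Int) := by push_cast; ring
      refine ⟨?_, ?_⟩
      · rw [nextPrimeLoop, if_neg (by simp [hiP]), hcast]; exact hstep.1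
      · rw [searchLoop, if_neg (by simp [hiB]), hcast]; exact hstep.2

-- ---- the two outer loops agree ----

theorem loop_eq (n : Int) (hn : 0 ≤ n) :
    ∀ (f : Nat) (q : Nat) (L : List Int) (prod : Int), 3 ≤ q → q % 2 = 1 → Nat.Prime q →
    L = primesBelow (q + 2) → PySem.List.pyGetD L (-1) 0 = (q : Int) →
    findLoopA n L prod f = findLoopB (2 ^ n.toNat) L prod f := by
  intro f
  induction f with
  | zero => intro q L prod _ _ _ _ _; rfl
  | succ f ih =>
    intro q L prod hq3 hqodd hqp hL hlast
    rw [findLoopA, findLoopB]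
    have hcond : pow2cond prod n = decide (prod ≤ 2 ^ n.toNat) := by
      rw [pow2cond, if_pos hn]
    by_cases hc : prod ≤ (2:Int) ^ n.toNat
    · rw [if_pos (by rw [hcond]; exact decide_eq_true hc), if_pos hc]
      -- the next prime after q
      have hex : ∃ x, q < x ∧ Nat.Prime x := by
        obtain ⟨p0, hp0, hgt, _⟩ := Nat.exists_prime_lt_and_le_two_mul q (by omega)
        exact ⟨p0, hgt, hp0⟩
      set P := Nat.find hex with hPdef
      obtain ⟨hPgt, hPp⟩ := Nat.find_spec hex
      have hPle : P ≤ 2 * q := by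
        obtain ⟨p0, hp0, hgt, hle⟩ := Nat.exists_prime_lt_and_le_two_mul q (by omega)
        exact le_trans (Nat.find_min' hex ⟨hgt, hp0⟩) hle
      have hPodd : P % 2 = 1 := by
        rcases Nat.mod_two_eq_zero_or_one P with h | h
        · have : P = 2 := hPp.even_iff.mp (Nat.even_iff.mpr h)
          omega
        · exact h
      have hnone : ∀ k, q + 2 ≤ k → k < P → ¬ Nat.Prime k := by
        intro k hk1 hk2 hkp
        exact (Nat.find_min hex hk2) ⟨by omega, hkp⟩
      have hsearch := search_eq P hPp hPodd (q + 4) (q + 2) L (by omega) (by omega)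
        (by omega) hnone (by omega) hL
      -- A's next prime
      have hA : nextPrime (PySem.List.pyGetD L (-1) 0) = (P : Int) := by
        rw [hlast, nextPrime, if_neg (by exact_mod_cast (by omega : ¬ (q ≤ 1)))]
        rw [Int.toNat_natCast, show ((q : Int) + 2) = ((q + 2 : Nat) : Int) by push_cast; ring]
        exact hsearch.1
      -- B's next prime
      have hB : searchLoop L (PySem.List.pyGetD L (-1) 0 + 2) ((PySem.List.pyGetD L (-1) 0).toNat + 4) = (P : Int) := by
        rw [hlast, Int.toNat_natCast, show ((q : Int) + 2) = ((q + 2 : Nat) : Int) by push_cast; ring]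
        exact hsearch.2
      show findLoopA n (L ++ [nextPrime (PySem.List.pyGetD L (-1) 0)])
            (prod * nextPrime (PySem.List.pyGetD L (-1) 0)) f =
          findLoopB (2 ^ n.toNat)
            (L ++ [searchLoop L (PySem.List.pyGetD L (-1) 0 + 2) ((PySem.List.pyGetD L (-1) 0).toNat + 4)])
            (prod * searchLoop L (PySem.List.pyGetD L (-1) 0 + 2) ((PySem.List.pyGetD L (-1) 0).toNat + 4)) f
      rw [hA, hB]
      -- maintain the invariant and recurse
      have hL' : L ++ [(P : Int)] = primesBelow (P + 2) := by
        have hstable : primesBelow P = primesBelow (q + 2) :=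
          primesBelow_stable (by omega) hnone
        rw [show P + 2 = (P + 1) + 1 from rfl,
          primesBelow_succ_not (not_prime_even_succ (by omega) hPodd),
          primesBelow_succ_prime hPp, hstable, hL]
      exact ih P (L ++ [(P : Int)]) (prod * (P : Int)) (by omega) hPodd hPp hL'
        (PySem.List.pyGetD_neg_one_append_singleton L (P : Int) 0)
    · rw [if_neg (by rw [hcond]; simpa using hc), if_neg hc]

-- ===== VERDICT (by name: the statement is the Claim_ definition above) =====
theorem find_firsts_spec : Claim_equal_find_firsts := by
  intro n _
  unfold Spec_find_firsts find_firsts find_firsts_alt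
  by_cases h3 : n < 3
  · rw [if_pos h3]
    have hcond : pow2cond 6 n = false := by
      rw [pow2cond]
      by_cases hn : 0 ≤ n
      · rw [if_pos hn]
        have hle : n.toNat ≤ 2 := by omega
        have h4 : (2:Int) ^ n.toNat ≤ (2:Int) ^ 2 := by
          apply pow_le_pow_right₀ (by norm_num) hle
        norm_num at h4
        simp only [decide_eq_false_iff_not, not_le]
        linarith
      · rw [if_neg hn]
    rw [findLoopA, hcond]
    simp
  · push_neg at h3
    rw [if_neg (not_lt.mpr h3)]
    exact loop_eq n (by omega) (n.toNat + 1) 3 [2, 3] 6 (by norm_num) (by norm_num)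
      (by norm_num) (by decide) (by decide)
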